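-- pv_equiv track=rewrite | github.com/ShadowKingYT444/ChorusAi | Chorus/orchestrator/billing.py | quote_job
-- ===== SOURCE A (Python) =====
-- PLATFORM_FEE_BPS = 50  # 0.5 %
--
-- _BPS_DENOM = 10_000
--
-- _MTOK = 1_000_000
--
-- MODEL_PRICING: dict[str, tuple[int, int]] = {
--     "default":   (100, 300),   # $0.10 / $0.30
--     "llama3:8b": (100, 300),
--     "llama3:70b": (700, 1500),
--     "qwen2:7b":  (80, 250),
--     "mistral:7b": (100, 300),
-- }
--
-- def price_for(model_id: str | None) -> tuple[int, int]:
--     """Return (price_in_uc, price_out_uc) per MTOK for `model_id`.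
--
--     Unknown / None model falls back to the 'default' bucket so shadow-mode
--     metering never crashes on an unfamiliar peer announcement.
--     """
--     if not model_id:
--         return MODEL_PRICING["default"]
--     return MODEL_PRICING.get(model_id, MODEL_PRICING["default"])
--
-- def compute_cost_uc(
--     model_id: str | None,
--     tokens_in: int,
--     tokens_out: int,
--     wall_ms: int,
-- ) -> int:
--     """Token-based compute cost in micro-USDC.
--
--     `wall_ms` is accepted but not yet priced; reserved for a future
--     GPU-seconds dimension when peers advertise hardware class.
--     """
--     del wall_ms  # reserved
--     price_in, price_out = price_for(model_id)
--     ti = max(0, int(tokens_in))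
--     to = max(0, int(tokens_out))
--     # Integer math; truncates toward zero — acceptable at micro-USDC precision.
--     return (ti * price_in + to * price_out) // _MTOK
--
-- def quote_job(
--     model_ids: list[str],
--     agent_count: int,
--     expected_tokens_in: int,
--     expected_tokens_out: int,
-- ) -> dict:
--     """Pre-flight quote across an ensemble of models.
--
--     Returns {subtotal_uc, platform_fee_uc, total_uc}. `agent_count` multiplies
--     the per-model-round cost because each agent slot incurs one inference.
--     """
--     agents = max(1, int(agent_count))
--     if not model_ids:
--         model_ids = ["default"]
--     per_agent = 0
--     for mid in model_ids:
--         per_agent += compute_cost_uc(mid, expected_tokens_in, expected_tokens_out, 0)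
--     # Average across the ensemble (each agent runs one model, not all).
--     subtotal = (per_agent * agents) // max(1, len(model_ids))
--     fee = _platform_fee(subtotal)
--     return {
--         "subtotal_uc": subtotal,
--         "platform_fee_uc": fee,
--         "total_uc": subtotal + fee,
--     }
--
-- def _platform_fee(subtotal_uc: int) -> int:
--     """0.5% of subtotal, floored at 1 uc when subtotal is positive."""
--     if subtotal_uc <= 0:
--         return 0
--     fee = (subtotal_uc * PLATFORM_FEE_BPS) // _BPS_DENOM
--     return fee if fee >= 1 else 1
-- ===== SOURCE B (Python) =====
-- MODEL_PRICING = {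
--     "default":   (100, 300),
--     "llama3:8b": (100, 300),
--     "llama3:70b": (700, 1500),
--     "qwen2:7b":  (80, 250),
--     "mistral:7b": (100, 300),
-- }
--
--
-- def quote_job(model_ids, agent_count, expected_tokens_in, expected_tokens_out):
--     # Bucket ids by their (price_in, price_out) pair, then price each
--     # bucket once: c * cost(pair).  Cost depends only on the pair and the
--     # fixed token counts, so the grouped sum equals A's per-id scan.
--     ids = model_ids if model_ids else ["default"]
--     ti = max(0, int(expected_tokens_in))
--     to = max(0, int(expected_tokens_out))
--     buckets = {}
--     for mid in ids:
--         pair = (MODEL_PRICING.get(mid, MODEL_PRICING["default"])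
--                 if mid else MODEL_PRICING["default"])
--         buckets[pair] = buckets.get(pair, 0) + 1
--     per_agent = 0
--     for (pin, pout), c in buckets.items():
--         per_agent += c * ((ti * pin + to * pout) // 1_000_000)
--     subtotal = (per_agent * max(1, int(agent_count))) // len(ids)
--     fee = 0 if subtotal <= 0 else max(1, subtotal * 50 // 10_000)
--     return {"subtotal_uc": subtotal, "platform_fee_uc": fee, "total_uc": subtotal + fee}
-- ===== Notes on version B (the rewrite author's own statement) =====
-- stated objective: faster
-- what changed: B buckets the model ids by their (price_in, price_out) pair in one counting pass and prices each bucket once (count * bucket cost, folded over the bucket items), instead of A's per-id compute_cost_uc call on every element; the divisor stays the full id count and the fee is inlined with max.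
import Mathlib
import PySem

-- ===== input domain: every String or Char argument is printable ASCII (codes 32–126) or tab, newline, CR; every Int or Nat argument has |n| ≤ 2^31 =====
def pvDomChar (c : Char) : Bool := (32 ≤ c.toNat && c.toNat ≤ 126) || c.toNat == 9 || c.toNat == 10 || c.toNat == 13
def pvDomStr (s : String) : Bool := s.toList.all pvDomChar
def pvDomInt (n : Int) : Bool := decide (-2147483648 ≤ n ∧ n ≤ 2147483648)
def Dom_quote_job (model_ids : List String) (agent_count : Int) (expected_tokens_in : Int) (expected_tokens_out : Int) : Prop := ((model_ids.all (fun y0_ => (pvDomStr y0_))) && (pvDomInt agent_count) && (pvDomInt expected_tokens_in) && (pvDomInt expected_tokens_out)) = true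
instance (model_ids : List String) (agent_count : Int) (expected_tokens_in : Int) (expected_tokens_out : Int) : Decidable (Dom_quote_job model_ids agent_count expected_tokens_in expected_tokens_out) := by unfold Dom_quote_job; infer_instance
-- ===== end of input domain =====

-- ===== PORT A =====
-- B buckets the ids by their price pair and prices each bucket once (c * cost); same value everywhere (total functions).
def MODEL_PRICING : PySem.Dict String (Int × Int) :=
  PySem.Dict.ofList [("default", (100, 300)), ("llama3:8b", (100, 300)),
    ("llama3:70b", (700, 1500)), ("qwen2:7b", (80, 250)), ("mistral:7b", (100, 300))]

def price_for (model_id : String) : Int × Int :=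
  if model_id = "" then (MODEL_PRICING.get? "default").getD (0, 0)
  else MODEL_PRICING.getD model_id ((MODEL_PRICING.get? "default").getD (0, 0))

def compute_cost_uc (model_id : String) (tokens_in : Int) (tokens_out : Int) (_wall_ms : Int) : Int :=
  let p := price_for model_id
  let ti := max 0 tokens_in
  let tout := max 0 tokens_out
  PySem.Int.floordiv (ti * p.1 + tout * p.2) 1000000

def platform_fee (subtotal_uc : Int) : Int :=
  if subtotal_uc ≤ 0 then 0
  else
    let fee := PySem.Int.floordiv (subtotal_uc * 50) 10000
    if fee ≥ 1 then fee else 1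

def quote_job (model_ids : List String) (agent_count : Int) (expected_tokens_in : Int) (expected_tokens_out : Int) : List (String × Int) :=
  let agents := max 1 agent_count
  let ids := if model_ids = [] then ["default"] else model_ids
  let per_agent := ids.foldl (fun acc mid => acc + compute_cost_uc mid expected_tokens_in expected_tokens_out 0) 0
  let subtotal := PySem.Int.floordiv (per_agent * agents) (max 1 (ids.length : Int))
  let fee := platform_fee subtotal
  [("subtotal_uc", subtotal), ("platform_fee_uc", fee), ("total_uc", subtotal + fee)]

-- ===== PORT B =====
def PRICING_B : PySem.Dict String (Int × Int) :=
  PySem.Dict.ofList [("default", (100, 300)), ("llama3:8b", (100, 300)),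
    ("llama3:70b", (700, 1500)), ("qwen2:7b", (80, 250)), ("mistral:7b", (100, 300))]

def pricePair (mid : String) : Int × Int :=
  if mid = "" then (PRICING_B.get? "default").getD (0, 0)
  else PRICING_B.getD mid ((PRICING_B.get? "default").getD (0, 0))

def quote_job_alt (model_ids : List String) (agent_count : Int) (expected_tokens_in : Int) (expected_tokens_out : Int) : List (String × Int) :=
  let ids := if model_ids = [] then ["default"] else model_ids
  let ti := max 0 expected_tokens_in
  let tout := max 0 expected_tokens_out
  let buckets : PySem.Dict (Int × Int) Int :=
    ids.foldl (fun d mid => d.insert (pricePair mid) (d.getD (pricePair mid) 0 + 1)) PySem.Dict.empty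
  let per_agent := buckets.items.foldl
    (fun acc p => acc + p.2 * PySem.Int.floordiv (ti * p.1.1 + tout * p.1.2) 1000000) 0
  let subtotal := PySem.Int.floordiv (per_agent * max 1 agent_count) (ids.length : Int)
  let fee := if subtotal ≤ 0 then 0 else max 1 (PySem.Int.floordiv (subtotal * 50) 10000)
  [("subtotal_uc", subtotal), ("platform_fee_uc", fee), ("total_uc", subtotal + fee)]

-- ===== PRECONDITION & SPEC =====
def Spec_quote_job (model_ids : List String) (agent_count : Int) (expected_tokens_in : Int) (expected_tokens_out : Int) (out : List (String × Int)) : Prop := out = quote_job_alt model_ids agent_count expected_tokens_in expected_tokens_out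
instance (model_ids : List String) (agent_count : Int) (expected_tokens_in : Int) (expected_tokens_out : Int) (out : List (String × Int)) : Decidable (Spec_quote_job model_ids agent_count expected_tokens_in expected_tokens_out out) := by unfold Spec_quote_job; infer_instance

-- ===== CLAIM (what is proved, stated in full; the proofs are below) =====
def Claim_equal_quote_job : Prop := ∀ (model_ids : List String) (agent_count : Int) (expected_tokens_in : Int) (expected_tokens_out : Int), Dom_quote_job model_ids agent_count expected_tokens_in expected_tokens_out → Spec_quote_job model_ids agent_count expected_tokens_in expected_tokens_out (quote_job model_ids agent_count expected_tokens_in expected_tokens_out)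

-- ===== LEMMAS AND PROOFS =====

-- Summing count * f over the distinct elements equals summing f over the whole list.
theorem sum_dedup_count_mul {α : Type} [BEq α] [LawfulBEq α] [DecidableEq α]
    (xs : List α) (f : α → Int) :
    ((PySem.List.dedup xs).map (fun k => (xs.count k : Int) * f k)).sum = (xs.map f).sum := by
  have hperm : (PySem.List.dedup xs).Perm xs.dedup := by
    rw [List.perm_ext_iff_of_nodup (PySem.List.nodup_dedup xs) xs.nodup_dedup]
    intro a; simp
  rw [(hperm.map (fun k => (xs.count k : Int) * f k)).sum_eq]
  rw [Finset.sum_list_map_count xs f, ← List.sum_toFinset _ xs.nodup_dedup]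
  have h : xs.dedup.toFinset = xs.toFinset := by ext a; simp
  rw [h]
  refine Finset.sum_congr rfl (fun m _ => ?_)
  rw [nsmul_eq_mul]
  congr 2
  simp only [List.count_eq_countP]
  exact List.countP_congr (fun a _ => by rw [Bool.eq_iff_iff]; simp [beq_iff_eq])

-- A's per-id accumulation equals B's bucket-items accumulation.
theorem per_agent_eq (ids : List String) (pf : String → Int × Int) (g : Int × Int → Int) :
    ids.foldl (fun acc mid => acc + g (pf mid)) 0 =
      ((ids.foldl (fun d mid => d.insert (pf mid) (d.getD (pf mid) 0 + 1))
          (PySem.Dict.empty : PySem.Dict (Int × Int) Int)).items).foldl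
        (fun acc p => acc + p.2 * g p.1) 0 := by
  have hb : (ids.foldl (fun d mid => d.insert (pf mid) (d.getD (pf mid) 0 + 1))
      (PySem.Dict.empty : PySem.Dict (Int × Int) Int))
      = PySem.Dict.counter (ids.map pf) := by
    rw [← PySem.Dict.foldl_insert_getD_add_one_eq_counter, List.foldl_map]
  rw [hb, PySem.Dict.items_counter,
    PySem.List.foldl_add _ (fun p : (Int × Int) × Int => p.2 * g p.1) 0,
    PySem.List.foldl_add ids (fun mid => g (pf mid)) 0]
  simp only [List.map_map, zero_add]
  have := sum_dedup_count_mul (ids.map pf) g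
  simp only [PySem.List.dedup_eq_ofList] at this
  rw [show ((fun p : (Int × Int) × Int => p.2 * g p.1) ∘ fun k => (k, ((ids.map pf).count k : Int)))
        = fun k => ((ids.map pf).count k : Int) * g k from rfl, this, List.map_map]
  rfl

-- The two fee computations agree.
theorem fee_eq (s : Int) :
    platform_fee s = if s ≤ 0 then 0 else max 1 (PySem.Int.floordiv (s * 50) 10000) := by
  unfold platform_fee
  by_cases h : s ≤ 0
  · simp [h]
  · simp only [h, if_false]
    split <;> omega

-- ===== VERDICT (by name: the statement is the Claim_ definition above) =====
theorem quote_job_spec : Claim_equal_quote_job := by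
  intro model_ids agent_count ein eout _
  unfold Spec_quote_job quote_job quote_job_alt
  have hids : (if model_ids = [] then ["default"] else model_ids) ≠ [] := by
    split_ifs with h <;> simp [h]
  have hlen : max 1 (((if model_ids = [] then ["default"] else model_ids).length : Int))
      = ((if model_ids = [] then ["default"] else model_ids).length : Int) := by
    have : 1 ≤ (if model_ids = [] then ["default"] else model_ids).length :=
      List.length_pos_iff.mpr hids
    omega
  have hpp : ∀ mid, compute_cost_uc mid ein eout 0
      = (fun p : Int × Int => PySem.Int.floordiv (max 0 ein * p.1 + max 0 eout * p.2) 1000000)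
          (pricePair mid) := fun mid => rfl
  simp only [hpp, hlen, fee_eq,
    per_agent_eq _ pricePair
      (fun p : Int × Int => PySem.Int.floordiv (max 0 ein * p.1 + max 0 eout * p.2) 1000000)]
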